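-- pv_equiv track=rewrite | github.com/parklab/mutagenesis_tools | make_all_nmer_substitutions_copy_dev.py | get_new_substitutions
-- ===== SOURCE A (Python) =====
-- import itertools
--
-- def get_new_substitutions (inseq):
--
-- 	bases = ['a','c','g','t']
-- 	inds_bases = range(len(bases))
-- 	kmers = []
--
-- 	#for i in itertools.combinations_with_replacement(bases, len(inseq)):
-- 	for i in itertools.product(inds_bases, repeat = len(inseq)):
-- 		combination = [bases[k] for k in i]
-- 		kmers.append(''.join(combination))
--
-- 	substitutions = list(set(kmers) - set([inseq.lower()]))
-- 	return(substitutions)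
-- ===== SOURCE B (Python) =====
-- def get_new_substitutions(inseq):
--     n = len(inseq)
--     kmers = []
--     for x in range(4 ** n):
--         v = x
--         chars = []
--         for _ in range(n):
--             chars.append("acgt"[v % 4])
--             v //= 4
--         kmers.append(''.join(reversed(chars)))
--     return list(set(kmers) - {inseq.lower()})
-- ===== Notes on version B (the rewrite author's own statement) =====
-- stated objective: alternative
-- what changed: B replaces itertools.product over index tuples by a single counting loop over range(4**n) that decodes each integer into its n base-4 digits (0,1,2,3 mapped to a,c,g,t) to build the k-mer list, keeping the final set subtraction of inseq.lower().
import Mathlib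
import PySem

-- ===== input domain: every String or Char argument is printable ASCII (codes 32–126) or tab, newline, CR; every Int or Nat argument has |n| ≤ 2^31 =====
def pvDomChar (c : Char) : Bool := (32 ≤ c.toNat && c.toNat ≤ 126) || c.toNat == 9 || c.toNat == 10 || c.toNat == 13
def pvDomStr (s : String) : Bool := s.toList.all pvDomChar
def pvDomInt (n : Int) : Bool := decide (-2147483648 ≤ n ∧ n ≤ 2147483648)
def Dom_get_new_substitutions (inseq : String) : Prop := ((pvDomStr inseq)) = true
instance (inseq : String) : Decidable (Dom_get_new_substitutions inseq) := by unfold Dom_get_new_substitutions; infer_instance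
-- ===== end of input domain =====

-- B enumerates the 4^n k-mers by decoding each x in range(4**n) into its base-4 digits
-- (0,1,2,3 ↦ a,c,g,t) instead of itertools.product over index tuples; alternative decomposition, similar cost.
-- Note: both versions return list(set(kmers) - {low}); CPython's hash iteration order is not modelled —
-- both ports use first-insertion order (the two Pythons insert the same elements in the same order, so they agree exactly).

-- ===== PORT A =====
-- itertools.product(inds_bases, repeat = n): leftmost factor varies slowest (exact order of itertools.product)
def pvProdIdx (r : List Int) : Nat → List (List Int)
  | 0 => [[]]
  | n+1 => r.flatMap (fun a => (pvProdIdx r n).map (fun rest => a :: rest))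

def get_new_substitutions (inseq : String) : List String :=
  let bases : List String := ["a","c","g","t"]
  let indsBases := PySem.List.pyRange 0 (bases.length : Int) 1
  -- len(inseq) ≥ 0: ported as the Nat inseq.toList.length
  let kmers := (pvProdIdx indsBases inseq.toList.length).foldl
      (fun acc i =>
        acc ++ [PySem.Str.join "" (i.map (fun k => PySem.List.pyGetD bases k ""))]) []
  PySem.Set.diff (PySem.Set.ofList kmers) (PySem.Set.ofList [PySem.Str.lower inseq])

-- ===== PORT B =====
-- the inner loop of Source B: n times append "acgt"[v % 4] ("acgt"[d] with 0 ≤ d < 4, so getD is exact) then v //= 4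
def pvDigitsLSB : Nat → Nat → List String
  | 0, _ => []
  | n+1, v => (["a","c","g","t"].getD (v % 4) "") :: pvDigitsLSB n (v / 4)

def get_new_substitutions_alt (inseq : String) : List String :=
  let n := inseq.toList.length
  let kmers := (List.range (4 ^ n)).foldl
    (fun acc x => acc ++ [PySem.Str.join "" (pvDigitsLSB n x).reverse]) []
  PySem.Set.diff (PySem.Set.ofList kmers) (PySem.Set.ofList [PySem.Str.lower inseq])

-- ===== PRECONDITION & SPEC =====
def Spec_get_new_substitutions (inseq : String) (out : List String) : Prop := out = get_new_substitutions_alt inseq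
instance (inseq : String) (out : List String) : Decidable (Spec_get_new_substitutions inseq out) := by unfold Spec_get_new_substitutions; infer_instance

-- ===== CLAIM (what is proved, stated in full; the proofs are below) =====
def Claim_equal_get_new_substitutions : Prop := ∀ (inseq : String), Dom_get_new_substitutions inseq → Spec_get_new_substitutions inseq (get_new_substitutions inseq)

-- ===== LEMMAS AND PROOFS =====

-- base-4 digits of v, most significant first, width n
def pvDigL : Nat → Nat → List Nat
  | 0, _ => []
  | n+1, v => pvDigL n (v / 4) ++ [v % 4]

def pvStrD (d : Nat) : String := ["a","c","g","t"].getD d ""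

theorem pvDigitsLSB_reverse (n v : Nat) :
    (pvDigitsLSB n v).reverse = (pvDigL n v).map pvStrD := by
  induction n generalizing v with
  | zero => simp [pvDigitsLSB, pvDigL]
  | succ n ih => simp [pvDigitsLSB, pvDigL, ih, pvStrD]

theorem pvDigL_succ_top (n v : Nat) :
    pvDigL (n+1) v = (v / 4^n % 4) :: pvDigL n (v % 4^n) := by
  induction n generalizing v with
  | zero => simp [pvDigL]
  | succ n ih =>
    show pvDigL (n+1) (v / 4) ++ [v % 4] = _
    rw [ih]
    have h1 : v / 4 / 4^n = v / 4^(n+1) := by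
      rw [Nat.div_div_eq_div_mul, pow_succ, mul_comm]
    have h2 : v / 4 % 4^n = v % 4^(n+1) / 4 := by
      rw [pow_succ, mul_comm]
      exact (Nat.mod_mul_right_div_self v 4 (4^n)).symm
    have h3 : v % 4 = v % 4^(n+1) % 4 := by
      rw [Nat.mod_mod_of_dvd]
      exact dvd_pow_self 4 (Nat.succ_ne_zero n)
    rw [h1, h2, h3]
    simp [pvDigL]

theorem pvProdIdx_eq_range (n : Nat) :
    pvProdIdx [0,1,2,3] n = (List.range (4^n)).map (fun x => (pvDigL n x).map Int.ofNat) := by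
  induction n with
  | zero => simp [pvProdIdx, pvDigL]
  | succ n ih =>
    have hblock : ∀ j : Nat, j < 4 →
        ((List.range (4^n)).map (fun r => j * 4^n + r)).map
            (fun x => (pvDigL (n+1) x).map Int.ofNat)
          = (List.range (4^n)).map (fun x => (Int.ofNat j) :: (pvDigL n x).map Int.ofNat) := by
      intro j hj
      rw [List.map_map]
      refine List.map_congr_left (fun r hr => ?_)
      have hrlt : r < 4^n := List.mem_range.mp hr
      have hpos : 0 < 4^n := Nat.pow_pos (by norm_num : (0:Nat) < 4)
      have hdiv : (j * 4^n + r) / 4^n = j := by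
        rw [mul_comm, Nat.mul_add_div hpos, Nat.div_eq_of_lt hrlt, add_zero]
      have hmod : (j * 4^n + r) % 4^n = r := by
        rw [mul_comm, Nat.mul_add_mod, Nat.mod_eq_of_lt hrlt]
      simp only [Function.comp, pvDigL_succ_top, hdiv, hmod, Nat.mod_eq_of_lt hj, List.map_cons]
    have hsplit : List.range (4^(n+1)) =
        ((List.range (4^n)).map (fun r => 0 * 4^n + r)) ++
        (((List.range (4^n)).map (fun r => 1 * 4^n + r)) ++
        (((List.range (4^n)).map (fun r => 2 * 4^n + r)) ++
        ((List.range (4^n)).map (fun r => 3 * 4^n + r)))) := by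
      have h4 : (4:Nat)^(n+1) = 4^n + (4^n + (4^n + 4^n)) := by ring
      rw [h4]
      simp only [List.range_add, List.map_append, List.map_map]
      refine congrArg₂ _ ?_ (congrArg₂ _ ?_ (congrArg₂ _ ?_ ?_))
      · simp
      all_goals
        refine List.map_congr_left (fun r _ => ?_)
        try simp only [Function.comp_def]
        omega
    show ([0,1,2,3] : List Int).flatMap (fun a => (pvProdIdx [0,1,2,3] n).map (fun rest => a :: rest)) = _
    rw [ih, hsplit]
    simp only [List.flatMap_cons, List.flatMap_nil, List.map_append, List.map_map,
               hblock 0 (by norm_num), hblock 1 (by norm_num), hblock 2 (by norm_num),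
               hblock 3 (by norm_num), List.append_nil]
    simp [Function.comp_def]

-- the k-mer string both ports build for index x at width n
def pvG (n x : Nat) : String := PySem.Str.join "" ((pvDigL n x).map pvStrD)

theorem pv_main (inseq : String) :
    get_new_substitutions inseq = get_new_substitutions_alt inseq := by
  unfold get_new_substitutions get_new_substitutions_alt
  simp only []
  have hrange : PySem.List.pyRange 0 ((["a","c","g","t"] : List String).length : Int) 1
      = [0,1,2,3] := by decide
  set n := inseq.toList.length with hn
  -- the two k-mer lists coincide element by element
  have hA : (pvProdIdx (PySem.List.pyRange 0 ((["a","c","g","t"] : List String).length : Int) 1) n).foldl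
      (fun acc i =>
        acc ++ [PySem.Str.join "" (i.map (fun k => PySem.List.pyGetD ["a","c","g","t"] k ""))]) []
      = (List.range (4^n)).map (pvG n) := by
    rw [hrange, PySem.List.foldl_append_singleton_eq_map, List.nil_append,
        pvProdIdx_eq_range, List.map_map]
    refine List.map_congr_left (fun x _ => ?_)
    simp only [Function.comp, pvG, List.map_map]
    congr 1
    refine List.map_congr_left (fun d _ => ?_)
    show PySem.List.pyGetD ["a","c","g","t"] (Int.ofNat d) "" = pvStrD d
    rw [Int.ofNat_eq_natCast, PySem.List.pyGetD_natCast]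
    rfl
  have hB : (List.range (4 ^ n)).foldl
      (fun acc x => acc ++ [PySem.Str.join "" (pvDigitsLSB n x).reverse]) []
      = (List.range (4^n)).map (pvG n) := by
    rw [PySem.List.foldl_append_singleton_eq_map, List.nil_append]
    refine List.map_congr_left (fun x _ => ?_)
    rw [pvDigitsLSB_reverse]
    rfl
  rw [hA, hB]

-- ===== VERDICT (by name: the statement is the Claim_ definition above) =====
theorem get_new_substitutions_spec : Claim_equal_get_new_substitutions := by
  intro inseq _
  exact pv_main inseq
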